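-- pv_equiv track=rewrite | github.com/hayssamchebli-chh/Item-Code-Converter | llm_extractor.py | _extract_top_level_json_objects
-- ===== SOURCE A (Python) =====
-- def _extract_top_level_json_objects(s: str):
--     """
--     Salvage parser: scan text and extract substrings that look like top-level JSON objects { ... }
--     respecting strings and escapes, so we don't split in the middle of a quoted string.
--     """
--     objs = []
--     in_str = False
--     esc = False
--     depth = 0
--     start = None
--
--     for i, ch in enumerate(s):
--         if in_str:
--             if esc:
--                 esc = False
--                 continue
--             if ch == "\\":
--                 esc = True
--                 continue
--             if ch == '"':
--                 in_str = False
--             continue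
--
--         # not in string
--         if ch == '"':
--             in_str = True
--             continue
--
--         if ch == "{":
--             if depth == 0:
--                 start = i
--             depth += 1
--         elif ch == "}":
--             if depth > 0:
--                 depth -= 1
--                 if depth == 0 and start is not None:
--                     objs.append(s[start:i+1])
--                     start = None
--
--     return objs
-- ===== SOURCE B (Python) =====
-- def _extract_top_level_json_objects(s: str):
--     # Pass 1: collect structural brace events (index, is_open) outside strings.
--     events = []
--     in_str = False
--     esc = False
--     for i, ch in enumerate(s):
--         if in_str:
--             if esc:
--                 esc = False
--             elif ch == "\\":
--                 esc = True
--             elif ch == '"':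
--                 in_str = False
--         elif ch == '"':
--             in_str = True
--         elif ch == "{" or ch == "}":
--             events.append((i, ch == "{"))
--     # Pass 2: match braces by depth over the event list only.
--     objs = []
--     depth = 0
--     start = 0
--     for i, is_open in events:
--         if is_open:
--             if depth == 0:
--                 start = i
--             depth += 1
--         elif depth > 0:
--             depth -= 1
--             if depth == 0:
--                 objs.append(s[start:i + 1])
--     return objs
-- ===== Notes on version B (the rewrite author's own statement) =====
-- stated objective: alternative
-- what changed: Replaces A's single fused scan (string-state + depth + emission in one loop) by two passes: pass 1 collects only the structural brace events (index, is_open) outside strings, pass 2 matches depths over that short event list and slices the objects.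
import Mathlib
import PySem

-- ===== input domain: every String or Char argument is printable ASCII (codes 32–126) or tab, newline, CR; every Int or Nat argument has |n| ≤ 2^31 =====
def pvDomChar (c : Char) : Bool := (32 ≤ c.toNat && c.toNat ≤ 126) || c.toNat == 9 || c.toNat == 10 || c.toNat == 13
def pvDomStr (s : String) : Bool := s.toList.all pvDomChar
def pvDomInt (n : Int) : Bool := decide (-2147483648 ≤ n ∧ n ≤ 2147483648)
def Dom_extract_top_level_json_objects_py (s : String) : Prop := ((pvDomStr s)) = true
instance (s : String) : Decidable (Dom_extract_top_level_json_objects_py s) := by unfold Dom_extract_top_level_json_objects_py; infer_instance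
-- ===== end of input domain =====

-- B: alternative decomposition — one pass collecting brace events outside strings, then a
-- second pass matching depths over that event list; same cost, not claimed faster.

-- ===== PORT A =====
-- single loop over enumerated characters carrying (objs, in_str, esc, depth, start)
def pvAloop (s : List Char) (l : List Char) (i : Nat) (objs : List String)
    (in_str esc : Bool) (depth : Nat) (start : Option Nat) : List String :=
  match l with
  | [] => objs
  | ch :: rest =>
    if in_str then
      if esc then pvAloop s rest (i+1) objs in_str false depth start
      else if ch = '\\' then pvAloop s rest (i+1) objs in_str true depth start
      else if ch = '"' then pvAloop s rest (i+1) objs false esc depth start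
      else pvAloop s rest (i+1) objs in_str esc depth start
    else if ch = '"' then pvAloop s rest (i+1) objs true esc depth start
    else if ch = '{' then
      pvAloop s rest (i+1) objs in_str esc (depth+1) (if depth = 0 then some i else start)
    else if ch = '}' then
      if depth > 0 then
        if depth - 1 = 0 then
          match start with
          | some st =>
              pvAloop s rest (i+1)
                (objs ++ [String.ofList (PySem.List.slice s (some (st : Int)) (some ((i : Int) + 1)))])
                in_str esc (depth - 1) none
          | none => pvAloop s rest (i+1) objs in_str esc (depth - 1) start
        else pvAloop s rest (i+1) objs in_str esc (depth - 1) start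
      else pvAloop s rest (i+1) objs in_str esc depth start
    else pvAloop s rest (i+1) objs in_str esc depth start

def extract_top_level_json_objects_py (s : String) : List String :=
  pvAloop s.toList s.toList 0 [] false false 0 none

-- ===== PORT B =====
-- pass 1: brace events (index, is_open) outside strings
def pvBevents (l : List Char) (i : Nat) (events : List (Nat × Bool)) (in_str esc : Bool) :
    List (Nat × Bool) :=
  match l with
  | [] => events
  | ch :: rest =>
    if in_str then
      if esc then pvBevents rest (i+1) events in_str false
      else if ch = '\\' then pvBevents rest (i+1) events in_str true
      else if ch = '"' then pvBevents rest (i+1) events false esc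
      else pvBevents rest (i+1) events in_str esc
    else if ch = '"' then pvBevents rest (i+1) events true esc
    else if ch = '{' ∨ ch = '}' then pvBevents rest (i+1) (events ++ [(i, ch == '{')]) in_str esc
    else pvBevents rest (i+1) events in_str esc

-- pass 2: depth matching over the event list only
def pvBemit (s : List Char) (evs : List (Nat × Bool)) (objs : List String)
    (depth start : Nat) : List String :=
  match evs with
  | [] => objs
  | (i, isOpen) :: rest =>
    if isOpen then
      pvBemit s rest objs (depth+1) (if depth = 0 then i else start)
    else if depth > 0 then
      if depth - 1 = 0 then
        pvBemit s rest
          (objs ++ [String.ofList (PySem.List.slice s (some (start : Int)) (some ((i : Int) + 1)))])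
          (depth - 1) start
      else pvBemit s rest objs (depth - 1) start
    else pvBemit s rest objs depth start

def extract_top_level_json_objects_py_alt (s : String) : List String :=
  pvBemit s.toList (pvBevents s.toList 0 [] false false) [] 0 0

-- ===== PRECONDITION & SPEC =====
def Spec_extract_top_level_json_objects_py (s : String) (out : List String) : Prop := out = extract_top_level_json_objects_py_alt s
instance (s : String) (out : List String) : Decidable (Spec_extract_top_level_json_objects_py s out) := by unfold Spec_extract_top_level_json_objects_py; infer_instance

-- ===== CLAIM (what is proved, stated in full; the proofs are below) =====
def Claim_equal_extract_top_level_json_objects_py : Prop := ∀ (s : String), Dom_extract_top_level_json_objects_py s → Spec_extract_top_level_json_objects_py s (extract_top_level_json_objects_py s)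

-- ===== LEMMAS AND PROOFS =====

-- pass 1 accumulates on the left of whatever events it already holds
theorem pvBevents_acc (l : List Char) (i : Nat) (evs : List (Nat × Bool)) (in_str esc : Bool) :
    pvBevents l i evs in_str esc = evs ++ pvBevents l i [] in_str esc := by
  induction l generalizing i evs in_str esc with
  | nil => simp [pvBevents]
  | cons ch rest ih =>
    simp only [pvBevents, List.nil_append]
    split_ifs <;> (rw [ih]; try (conv_rhs => rw [ih]); try simp [List.append_assoc])

-- the fused loop of A equals pass 2 run over pass 1's events, under the start-link invariant
theorem pvAB_link (s l : List Char) (i : Nat) (objs : List String) (in_str esc : Bool)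
    (depth : Nat) (startA : Option Nat) (startB : Nat)
    (h : if depth = 0 then startA = none else startA = some startB) :
    pvAloop s l i objs in_str esc depth startA =
      pvBemit s (pvBevents l i [] in_str esc) objs depth startB := by
  induction l generalizing i objs in_str esc depth startA startB with
  | nil => simp [pvAloop, pvBevents, pvBemit]
  | cons ch rest ih =>
    simp only [pvAloop, pvBevents, List.nil_append]
    cases in_str with
    | true =>
      cases esc with
      | true => simpa using ih _ _ _ _ _ _ _ h
      | false =>
        by_cases hb : ch = '\\'
        · simpa [hb] using ih _ _ _ _ _ _ _ h
        · by_cases hq : ch = '"'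
          · simpa [hb, hq] using ih _ _ _ _ _ _ _ h
          · simpa [hb, hq] using ih _ _ _ _ _ _ _ h
    | false =>
      by_cases hq : ch = '"'
      · simpa [hq] using ih _ _ _ _ _ _ _ h
      · by_cases ho : ch = '{'
        · -- open brace: one event, consumed by pvBemit at the head
          subst ho
          simp only [Bool.false_eq_true, if_false, if_true, beq_self_eq_true]
          rw [pvBevents_acc rest (i+1) [(i, true)]]
          simp only [List.singleton_append]
          refine ih _ _ _ _ _ _ _ ?_
          by_cases hd : depth = 0
          · simp [hd]
          · have hA : startA = some startB := by simpa [hd] using h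
            simp [hd, hA]
        · by_cases hc : ch = '}'
          · -- close brace: one event, consumed by pvBemit at the head
            subst hc
            simp only [Bool.false_eq_true, if_false, or_true, if_true, if_neg hq, if_neg ho, Char.reduceBEq]
            rw [pvBevents_acc rest (i+1) [(i, false)]]
            simp only [List.singleton_append, pvBemit, Bool.false_eq_true, if_false]
            by_cases hd : depth = 0
            · have hA : startA = none := by simpa [hd] using h
              simp only [hd, hA, gt_iff_lt, lt_irrefl, if_false]
              exact ih _ _ _ _ _ _ _ (by simp)
            · have hpos : depth > 0 := Nat.pos_of_ne_zero hd
              have hA : startA = some startB := by simpa [hd] using h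
              simp only [hpos, if_true, hA]
              by_cases h1 : depth - 1 = 0
              · simp only [h1, if_true]
                exact ih _ _ _ _ _ _ _ (by simp)
              · simp only [h1, if_false]
                exact ih _ _ _ _ _ _ _ (by simp [h1])
          · simpa [hq, ho, hc] using ih _ _ _ _ _ _ _ h

-- ===== VERDICT (by name: the statement is the Claim_ definition above) =====
theorem extract_top_level_json_objects_py_spec : Claim_equal_extract_top_level_json_objects_py := by
  intro s _
  unfold Spec_extract_top_level_json_objects_py extract_top_level_json_objects_py
    extract_top_level_json_objects_py_alt
  exact pvAB_link s.toList s.toList 0 [] false false 0 none 0 (by simp)
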